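-- pv_equiv track=rewrite | github.com/cgiuffr/usenixae-results | results.py | xpath_param_escape
-- ===== SOURCE A (Python) =====
-- def xpath_param_escape(param):
--     # escape special characters in xpath
--     if param is None:
--         return param
--     special_chars = "<>&'\""
--     replacement = " "
--     for char in special_chars:
--         if char in param:
--             param = param.replace(char, replacement)
--     return param
-- ===== SOURCE B (Python) =====
-- def xpath_param_escape(param):
--     # Explicit per-character loop with an accumulator list; None passes through.
--     if param is None:
--         return None
--     buf = []
--     for c in param:
--         if c == '<' or c == '>' or c == '&' or c == "'" or c == '"':
--             buf.append(' ')
--         else: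
--             buf.append(c)
--     return ''.join(buf)
-- ===== Notes on version B (the rewrite author's own statement) =====
-- stated objective: alternative
-- what changed: One explicit per-character pass with an accumulator (each char tested against the five specials and emitted once), instead of five separate membership-test-plus-replace scans over the whole string.
import Mathlib
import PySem

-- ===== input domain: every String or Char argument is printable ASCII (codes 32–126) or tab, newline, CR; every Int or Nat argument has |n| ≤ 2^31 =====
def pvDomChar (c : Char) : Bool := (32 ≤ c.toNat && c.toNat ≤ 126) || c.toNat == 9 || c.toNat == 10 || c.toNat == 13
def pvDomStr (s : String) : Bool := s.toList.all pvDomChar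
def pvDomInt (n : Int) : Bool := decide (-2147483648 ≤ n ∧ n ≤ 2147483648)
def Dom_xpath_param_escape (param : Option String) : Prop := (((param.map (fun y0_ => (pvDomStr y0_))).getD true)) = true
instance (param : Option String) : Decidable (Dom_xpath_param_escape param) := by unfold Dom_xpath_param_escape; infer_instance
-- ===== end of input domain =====

-- B replaces A's five membership-test-plus-replace scans by one explicit per-character pass with an accumulator (alternative decomposition; same cost).


-- ===== PORT A =====
-- special_chars = "<>&'\"" iterated character by character
def pvSpecialsA : List Char := ['<', '>', '&', '\'', '"']

def xpath_param_escape (param : Option String) : Option String :=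
  match param with
  | none => none
  | some s =>
    -- for char in special_chars: if char in param: param = param.replace(char, " ")
    some (String.ofList (pvSpecialsA.foldl
      (fun cs ch =>
        if PySem.Chars.isIn [ch] cs then PySem.Chars.replace cs [ch] [' '] else cs)
      s.toList))

-- ===== PORT B =====
-- the per-character loop of Source B as the obvious structural recursion over the characters
def pvEscAux : List Char → List Char
  | [] => []
  | c :: rest =>
    (if c == '<' || c == '>' || c == '&' || c == '\'' || c == '"' then ' ' else c) :: pvEscAux rest

def xpath_param_escape_alt (param : Option String) : Option String :=
  match param with
  | none => none
  | some s => some (String.ofList (pvEscAux s.toList))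

-- ===== PRECONDITION & SPEC =====
def Spec_xpath_param_escape (param : Option String) (out : Option String) : Prop := out = xpath_param_escape_alt param
instance (param : Option String) (out : Option String) : Decidable (Spec_xpath_param_escape param out) := by unfold Spec_xpath_param_escape; infer_instance

-- ===== CLAIM (what is proved, stated in full; the proofs are below) =====
def Claim_equal_xpath_param_escape : Prop := ∀ (param : Option String), Dom_xpath_param_escape param → Spec_xpath_param_escape param (xpath_param_escape param)

-- ===== LEMMAS AND PROOFS =====

def pvSubst (c x : Char) : Char := if x = c then ' ' else x

theorem pv_go_single (c r : Char) :
    ∀ (fuel : Nat) (l acc : List Char), l.length ≤ fuel →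
      PySem.Chars.replace.go [c] [r] fuel l acc =
        acc.reverse ++ l.map (fun x => if x = c then r else x) := by
  intro fuel
  induction fuel with
  | zero =>
    intro l acc h
    have : l = [] := List.eq_nil_of_length_eq_zero (Nat.le_zero.mp h)
    subst this
    simp [PySem.Chars.replace.go]
  | succ n ih =>
    intro l acc h
    cases l with
    | nil => simp [PySem.Chars.replace.go]
    | cons x t =>
      by_cases hx : x = c
      · subst hx
        have hpre : [x].isPrefixOf (x :: t) = true := by simp [List.isPrefixOf]
        simp only [PySem.Chars.replace.go, hpre, if_pos, List.length_cons, List.length_nil,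
          List.drop_succ_cons, List.drop_zero, List.reverse_cons, List.reverse_nil, List.nil_append,
          List.singleton_append]
        rw [ih t (r :: acc) (by simp only [List.length_cons] at h; omega)]
        simp
      · have hpre : [c].isPrefixOf (x :: t) = false := by
          simp only [List.isPrefixOf, Bool.and_true]
          exact beq_eq_false_iff_ne.mpr (fun hc => hx hc.symm)
        simp only [PySem.Chars.replace.go, hpre, Bool.false_eq_true, if_false]
        rw [ih t (x :: acc) (by simp only [List.length_cons] at h; omega)]
        simp [hx]

theorem pv_replace_single (c r : Char) (s : List Char) :
    PySem.Chars.replace s [c] [r] = s.map (fun x => if x = c then r else x) := by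
  unfold PySem.Chars.replace
  rw [if_neg (by simp : ¬([c].isEmpty = true))]
  exact pv_go_single c r s.length s [] (le_refl _)

theorem pv_step (ch : Char) (cs : List Char) :
    (if PySem.Chars.isIn [ch] cs then PySem.Chars.replace cs [ch] [' '] else cs) =
      cs.map (pvSubst ch) := by
  by_cases h : PySem.Chars.isIn [ch] cs = true
  · simp only [h, if_pos]
    exact pv_replace_single ch ' ' cs
  · simp only [h, Bool.false_eq_true, if_false]
    have hmem : ch ∉ cs := by
      intro hm
      apply h
      rw [PySem.Chars.isIn_iff_infix]
      obtain ⟨pre, suf, hps⟩ := List.append_of_mem hm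
      exact ⟨pre, suf, by simp [hps]⟩
    symm
    calc cs.map (pvSubst ch)
        = cs.map id := List.map_congr_left (fun x hx => if_neg (fun he : x = ch => hmem (he ▸ hx)))
      _ = cs := List.map_id cs

theorem pv_point (x : Char) :
    pvSubst '"' (pvSubst '\'' (pvSubst '&' (pvSubst '>' (pvSubst '<' x)))) =
      (if x == '<' || x == '>' || x == '&' || x == '\'' || x == '"' then ' ' else x) := by
  by_cases h1 : x = '<'
  · subst h1; decide
  by_cases h2 : x = '>'
  · subst h2; decide
  by_cases h3 : x = '&'
  · subst h3; decide
  by_cases h4 : x = '\''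
  · subst h4; decide
  by_cases h5 : x = '"'
  · subst h5; decide
  simp [pvSubst, h1, h2, h3, h4, h5]

theorem pv_escAux_eq_map (l : List Char) :
    pvEscAux l = l.map (fun x =>
      if x == '<' || x == '>' || x == '&' || x == '\'' || x == '"' then ' ' else x) := by
  induction l with
  | nil => rfl
  | cons c t ih => simp [pvEscAux, ih]

set_option maxHeartbeats 800000 in
theorem xpath_param_escape_some (s : String) :
    xpath_param_escape (some s) = xpath_param_escape_alt (some s) := by
  simp only [xpath_param_escape, xpath_param_escape_alt, pvSpecialsA, pv_escAux_eq_map]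
  simp only [List.foldl, pv_step, List.map_map]
  congr 1
  apply congrArg
  apply List.map_congr_left
  intro x _
  exact pv_point x

-- ===== VERDICT (by name: the statement is the Claim_ definition above) =====
theorem xpath_param_escape_spec : Claim_equal_xpath_param_escape := by
  intro param _
  unfold Spec_xpath_param_escape
  cases param with
  | none => rfl
  | some s => exact xpath_param_escape_some s
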